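-- pv_equiv track=rewrite | github.com/lowellwang/lil-cn | scripts/validate_translation.py | find_first_lit_span
-- ===== SOURCE A (Python) =====
-- from typing import Any, Dict, List, Tuple, Set
--
-- def find_first_lit_span(arg: str) -> Tuple[int,int,str]|None:
--     """Return (start,end,quote) of first string literal including quotes."""
--     i = 0; n=len(arg)
--     while i<n:
--         ch = arg[i]
--         if ch in ("'",'"'):
--             quote=ch; j=i+1
--             while j<n:
--                 c=arg[j]
--                 if c=="\\" and j+1<n:
--                     j+=2; continue
--                 if c==quote:
--                     return i,j+1,quote
--                 j+=1
--             return None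
--         i+=1
--     return None
-- ===== SOURCE B (Python) =====
-- def _bs_run(s, p):
--     """Length of the maximal backslash run ending at index p (going downward)."""
--     b = 0
--     while p - b >= 0 and s[p - b] == "\\":
--         b += 1
--     return b
--
--
-- def find_first_lit_span(arg: str):
--     """Two-stage: collect quote positions, then test closers by backslash-run parity.
--
--     A quote occurrence closes the literal iff it is preceded by an even-length
--     run of backslashes (an odd run escapes it); runs never reach past the
--     opening quote, so the parity test over the whole string is exact.
--     """
--     qs = [(k, c) for k, c in enumerate(arg) if c in ("'", '"')]
--     if not qs:
--         return None
--     i, quote = qs[0]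
--     for j, c in qs[1:]:
--         if c == quote and _bs_run(arg, j - 1) % 2 == 0:
--             return i, j + 1, quote
--     return None
-- ===== Notes on version B (the rewrite author's own statement) =====
-- stated objective: alternative
-- what changed: Replaced A's forward escape-consuming nested scan (inner loop jumps j+=2 over escapes) by a two-stage method: collect all quote positions via enumerate, then test each later occurrence of the opening quote for closability by the parity of the maximal backslash run counted backwards from it.
import Mathlib
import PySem

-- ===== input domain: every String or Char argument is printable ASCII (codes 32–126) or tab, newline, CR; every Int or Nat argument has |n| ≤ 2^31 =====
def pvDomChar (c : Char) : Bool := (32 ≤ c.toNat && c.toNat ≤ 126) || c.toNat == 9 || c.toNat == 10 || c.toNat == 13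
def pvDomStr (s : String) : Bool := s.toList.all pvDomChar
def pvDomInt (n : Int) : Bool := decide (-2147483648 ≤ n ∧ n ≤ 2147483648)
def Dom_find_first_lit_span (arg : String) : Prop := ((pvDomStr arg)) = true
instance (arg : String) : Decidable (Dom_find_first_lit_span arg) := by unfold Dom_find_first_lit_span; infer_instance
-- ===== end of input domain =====

-- B replaces A's forward escape-consuming nested scan by a two-stage method: collect all
-- quote positions, then test each later occurrence of the opening quote for closability by
-- the parity of the backslash run immediately before it (alternative decomposition, same cost).

-- ===== PORT A =====
-- Inner while-loop of A: scan at index j inside a literal opened by `quote` at index i.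
-- The `[c]` pattern is Python's `j+1<n` failing: a trailing backslash is an ordinary char.
def findA_inner (q : Char) (i : Int) : List Char → Int → Option (Int × Int × String)
  | [], _ => none
  | [c], j => if c = q then some (i, j + 1, String.ofList [q]) else none
  | c :: d :: rest, j =>
    if c = '\\' then findA_inner q i rest (j + 2)
    else if c = q then some (i, j + 1, String.ofList [q])
    else findA_inner q i (d :: rest) (j + 1)

-- Outer while-loop of A: find the first quote character.
def findA_outer : List Char → Int → Option (Int × Int × String)
  | [], _ => none
  | ch :: rest, i =>
    if ch = '\'' ∨ ch = '"' then findA_inner ch i rest (i + 1)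
    else findA_outer rest (i + 1)

def find_first_lit_span (arg : String) : Option (Int × Int × String) :=
  findA_outer arg.toList 0

-- ===== PORT B =====
-- `c in ("'", '"')` of Source B
def quoteB (c : Char) : Bool := c == '\'' || c == '"'

-- _bs_run of Source B: length of the maximal backslash run ending at index p, going downward;
-- the while-loop's `p - b >= 0` guard is the `p < 0` stop. Indexing s[p-b] is always in
-- range when called (p < len), so List.getD is exact here.
def bsRun (cs : List Char) (p : Int) : Nat :=
  if p < 0 then 0
  else if cs.getD p.toNat ' ' = '\\' then bsRun cs (p - 1) + 1 else 0
termination_by (p + 1).toNat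
decreasing_by omega

-- the for-loop of Source B over the remaining quote occurrences
def closeB (cs : List Char) (i : Int) (q : Char) : List (Int × Char) → Option (Int × Int × String)
  | [] => none
  | (j, c) :: rest =>
    if c = q ∧ bsRun cs (j - 1) % 2 = 0 then some (i, j + 1, String.ofList [q])
    else closeB cs i q rest

def find_first_lit_span_alt (arg : String) : Option (Int × Int × String) :=
  match (PySem.List.enumerate arg.toList 0).filter (fun p => quoteB p.2) with
  | [] => none
  | (i, q) :: rest => closeB arg.toList i q rest

-- ===== PRECONDITION & SPEC =====
def Spec_find_first_lit_span (arg : String) (out : Option (Int × Int × String)) : Prop := out = find_first_lit_span_alt arg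
instance (arg : String) (out : Option (Int × Int × String)) : Decidable (Spec_find_first_lit_span arg out) := by unfold Spec_find_first_lit_span; infer_instance

-- ===== CLAIM (what is proved, stated in full; the proofs are below) =====
def Claim_equal_find_first_lit_span : Prop := ∀ (arg : String), Dom_find_first_lit_span arg → Spec_find_first_lit_span arg (find_first_lit_span arg)

-- ===== LEMMAS AND PROOFS =====

-- Intermediate machine: one flat scan with an "even run so far" flag.
def innerM (q : Char) (i : Int) : List Char → Int → Bool → Option (Int × Int × String)
  | [], _, _ => none
  | c :: rest, j, e =>
    if c = '\\' then innerM q i rest (j + 1) (!e)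
    else if c = q ∧ e = true then some (i, j + 1, String.ofList [q])
    else innerM q i rest (j + 1) true

def qf (k : Int) (l : List Char) : List (Int × Char) :=
  (PySem.List.enumerate l k).filter (fun p => quoteB p.2)

theorem bsRun_bs (cs : List Char) (p : Int) (h0 : 0 ≤ p) (h : cs.getD p.toNat ' ' = '\\') :
    bsRun cs p = bsRun cs (p - 1) + 1 := by
  rw [bsRun, if_neg (by omega), if_pos h]

theorem bsRun_other (cs : List Char) (p : Int) (h : cs.getD p.toNat ' ' ≠ '\\') :
    bsRun cs p = 0 := by
  rw [bsRun]
  by_cases h0 : p < 0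
  · rw [if_pos h0]
  · rw [if_neg h0, if_neg h]

theorem innerM_false (q : Char) (i : Int) (c : Char) (rest : List Char) (j : Int) :
    innerM q i (c :: rest) j false = innerM q i rest (j + 1) true := by
  simp only [innerM]
  split_ifs with h1 h2 <;> simp_all

theorem innerM_eq_A (q : Char) (hq : q ≠ '\\') (i : Int) :
    ∀ (l : List Char) (j : Int), innerM q i l j true = findA_inner q i l j := by
  intro l j
  fun_induction findA_inner q i l j with
  | case1 => rfl
  | case2 =>
    rename_i j
    simp [innerM, hq]
  | case3 =>
    rename_i c j h
    by_cases hb : c = '\\' <;> simp [innerM, h, hb]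
  | case4 =>
    rename_i d rest j ih
    rw [← ih, show (j : Int) + 2 = j + 1 + 1 by ring, ← innerM_false q i d rest (j + 1)]
    simp [innerM]
  | case5 =>
    rename_i d rest j h
    simp [innerM, hq]
  | case6 =>
    rename_i c d rest j h1 h2 ih
    rw [← ih]
    simp [innerM, h1, h2]

theorem getD_of_drop (cs : List Char) (k : Nat) (c : Char) (rest : List Char)
    (h : cs.drop k = c :: rest) : cs.getD k ' ' = c := by
  have h0 : (cs.drop k)[0]? = some c := by rw [h]; rfl
  rw [List.getElem?_drop] at h0
  simp only [Nat.add_zero] at h0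
  simp [List.getD, h0]

theorem drop_succ_of_drop (cs : List Char) (k : Nat) (c : Char) (rest : List Char)
    (h : cs.drop k = c :: rest) : cs.drop (k + 1) = rest := by
  have := congrArg List.tail h
  simpa [List.tail_drop] using this

theorem bridge (cs : List Char) (q : Char) (hq : q = '\'' ∨ q = '"') (i : Int) :
    ∀ (l : List Char) (k : Nat), cs.drop k = l → 1 ≤ k →
      innerM q i l (k : Int) (decide (bsRun cs ((k : Int) - 1) % 2 = 0)) =
        closeB cs i q (qf (k : Int) l) := by
  intro l
  induction l with
  | nil => intro k _ _; simp [innerM, qf, PySem.List.enumerate_nil, closeB]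
  | cons c rest ih =>
    intro k hdrop hk
    have hc : cs.getD k ' ' = c := getD_of_drop cs k c rest hdrop
    have hrest : cs.drop (k + 1) = rest := drop_succ_of_drop cs k c rest hdrop
    have hcast : ((k : Int)).toNat = k := by omega
    have hqf : qf (k : Int) (c :: rest) =
        (if quoteB c then [((k : Int), c)] else []) ++ qf ((k : Int) + 1) rest := by
      simp [qf, PySem.List.enumerate_cons]
      split_ifs <;> simp_all
    have ih' := ih (k + 1) hrest (by omega)
    have hkk : ((k + 1 : Nat) : Int) = (k : Int) + 1 := by push_cast; ring
    rw [hkk] at ih'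
    by_cases hbs : c = '\\'
    · -- backslash: run parity flips, not a quote position
      have hrun : bsRun cs (k : Int) = bsRun cs ((k : Int) - 1) + 1 :=
        bsRun_bs cs (k : Int) (by omega) (by rw [hcast, hc, hbs])
      have hquote : quoteB c = false := by rw [hbs]; decide
      have hflip : (!decide (bsRun cs ((k : Int) - 1) % 2 = 0)) =
          decide (bsRun cs ((k : Int) + 1 - 1) % 2 = 0) := by
        have : (k : Int) + 1 - 1 = (k : Int) := by ring
        rw [this, hrun]
        by_cases h : bsRun cs ((k : Int) - 1) % 2 = 0
        · have h1 : (bsRun cs ((k : Int) - 1) + 1) % 2 = 1 := by omega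
          simp [h, h1]
        · have h1 : (bsRun cs ((k : Int) - 1) + 1) % 2 = 0 := by omega
          simp [h, h1]
      simp only [innerM, if_pos hbs, hflip, ih', hqf, hquote]
      simp
    · -- not a backslash: run after this char restarts at 0
      have hrun0 : bsRun cs (k : Int) = 0 :=
        bsRun_other cs (k : Int) (by rw [hcast, hc]; exact hbs)
      have hnext : decide (bsRun cs ((k : Int) + 1 - 1) % 2 = 0) = true := by
        have : (k : Int) + 1 - 1 = (k : Int) := by ring
        simp [this, hrun0]
      by_cases hcq : c = q
      · -- a candidate closer: both sides test the parity of the run before it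
        subst hcq
        have hquote : quoteB c = true := by
          rcases hq with h | h <;> simp [quoteB, h]
        have hq' : c ≠ '\\' := hbs
        by_cases hpar : bsRun cs ((k : Int) - 1) % 2 = 0
        · simp [innerM, hpar, hqf, hquote, closeB, hq']
        · have hdec : decide (bsRun cs ((k : Int) - 1) % 2 = 0) = false := by simp [hpar]
          rw [hdec, innerM_false, ← hnext, ih', hqf]
          simp [hquote, closeB, hpar]
      · -- not the closing quote char (maybe the other quote, or ordinary)
        have hstep : ∀ e, innerM q i (c :: rest) (k : Int) e =
            innerM q i rest ((k : Int) + 1) true := by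
          intro e
          cases e
          · exact innerM_false q i c rest (k : Int)
          · simp [innerM, hbs, hcq]
        rw [hstep, ← hnext, ih', hqf]
        by_cases hquote : quoteB c = true
        · simp [hquote, closeB, hcq]
        · simp at hquote; simp [hquote]

theorem outer_eq (cs : List Char) :
    ∀ (l : List Char) (k : Nat), cs.drop k = l →
      findA_outer l (k : Int) =
        (match qf (k : Int) l with
         | [] => none
         | (i, q) :: rest => closeB cs i q rest) := by
  intro l
  induction l with
  | nil => intro k _; simp [findA_outer, qf, PySem.List.enumerate_nil]
  | cons c rest ih =>
    intro k hdrop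
    have hc : cs.getD k ' ' = c := getD_of_drop cs k c rest hdrop
    have hrest : cs.drop (k + 1) = rest := drop_succ_of_drop cs k c rest hdrop
    have hkk : ((k + 1 : Nat) : Int) = (k : Int) + 1 := by push_cast; ring
    by_cases hq : c = '\'' ∨ c = '"'
    · have hbs : c ≠ '\\' := by rcases hq with h | h <;> simp [h]
      have hquote : quoteB c = true := by rcases hq with h | h <;> simp [quoteB, h]
      have hrun0 : bsRun cs (k : Int) = 0 :=
        bsRun_other cs (k : Int) (by rw [show ((k : Int)).toNat = k by omega, hc]; exact hbs)
      have hstart : decide (bsRun cs ((k : Int) + 1 - 1) % 2 = 0) = true := by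
        have : (k : Int) + 1 - 1 = (k : Int) := by ring
        simp [this, hrun0]
      have hb := bridge cs c hq (k : Int) rest (k + 1) hrest (by omega)
      rw [hkk] at hb
      rw [hstart] at hb
      have hA : findA_outer (c :: rest) (k : Int) = findA_inner c (k : Int) rest ((k : Int) + 1) := by
        simp [findA_outer, hq]
      rw [hA, ← innerM_eq_A c hbs (k : Int) rest ((k : Int) + 1), hb]
      simp [qf, PySem.List.enumerate_cons, hquote]
    · have hquote : quoteB c = false := by
        simp [quoteB]; push Not at hq; exact ⟨hq.1, hq.2⟩
      have := ih (k + 1) hrest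
      rw [hkk] at this
      simp [findA_outer, hq, this, qf, PySem.List.enumerate_cons, hquote]

-- ===== VERDICT (by name: the statement is the Claim_ definition above) =====
theorem find_first_lit_span_spec : Claim_equal_find_first_lit_span := by
  intro arg _
  unfold Spec_find_first_lit_span find_first_lit_span find_first_lit_span_alt
  have h := outer_eq arg.toList arg.toList 0 (by simp)
  simpa [qf] using h
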